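-- pv_equiv track=rewrite | github.com/Matteo-Candi/Master-Thesis | benchmark/Python_formatted.py | find_substring_count
-- ===== SOURCE A (Python) =====
-- def find_substring_count(s):
--     result = 0
--     n = len(s)
--     i = 0
--     while i < n - 1:
--         if ord(s[i]) + 1 == ord(s[i + 1]):
--             result += 1
--             while i < n - 1 and ord(s[i]) + 1 == ord(s[i + 1]):
--                 i += 1
--         i += 1
--     return result
-- ===== SOURCE B (Python) =====
-- def find_substring_count(s):
--     # Inclusion-exclusion on the graph of "increasing" edges between adjacent
--     # characters: each maximal run contributes (edges) - (adjacent edge pairs) = 1,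
--     # so total runs = #matching pairs - #adjacent pairs that both match.
--     bs = [ord(a) + 1 == ord(b) for a, b in zip(s, s[1:])]
--     return sum(bs) - sum(1 for x, y in zip(bs, bs[1:]) if x and y)
-- ===== Notes on version B (the rewrite author's own statement) =====
-- stated objective: alternative
-- what changed: Replaced A's nested whiles with run-skipping by an inclusion-exclusion count: build the list of adjacent-pair matches, then return (number of matches) minus (number of adjacent pairs of matches), since each maximal run of k edges contributes k-(k-1)=1.
import Mathlib
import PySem

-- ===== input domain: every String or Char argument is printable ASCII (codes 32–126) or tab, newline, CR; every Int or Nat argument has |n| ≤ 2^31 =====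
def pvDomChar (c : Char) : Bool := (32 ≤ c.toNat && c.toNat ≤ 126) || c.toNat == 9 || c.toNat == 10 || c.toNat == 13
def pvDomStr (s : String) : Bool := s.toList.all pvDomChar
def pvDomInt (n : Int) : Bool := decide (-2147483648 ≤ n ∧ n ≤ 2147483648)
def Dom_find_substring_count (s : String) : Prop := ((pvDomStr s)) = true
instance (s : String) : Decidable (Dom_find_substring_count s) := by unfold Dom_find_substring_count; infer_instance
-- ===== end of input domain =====

-- B counts runs by inclusion-exclusion (matches minus adjacent match pairs) instead of A's
-- nested whiles that skip over each run; same O(n) cost, different counting principle.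

-- ===== PORT A =====
-- ord(s[i]) for an index the loop guards keep in range
def pvOrd (cs : List Char) (i : Nat) : Int := ((cs.getD i default).toNat : Int)

def pvMatch (cs : List Char) (i : Nat) : Bool := pvOrd cs i + 1 == pvOrd cs (i + 1)

-- the inner while: advance i while i < n-1 and pair i matches; returns the final i.
-- fuel (= len s, each step does i += 1 and the loop stops once i ≥ n-1) only makes the
-- same computation structurally recursive; it never runs out on the actual calls.
def innerA (cs : List Char) (fuel : Nat) (i : Nat) : Nat :=
  match fuel with
  | 0 => i
  | fuel + 1 => if i < cs.length - 1 ∧ pvMatch cs i = true then innerA cs fuel (i + 1) else i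

-- the outer while, same fuel discipline (i strictly increases every iteration)
def outerA (cs : List Char) (fuel : Nat) (i : Nat) (result : Int) : Int :=
  match fuel with
  | 0 => result
  | fuel + 1 =>
    if i < cs.length - 1 then
      if pvMatch cs i = true then outerA cs fuel (innerA cs cs.length i + 1) (result + 1)
      else outerA cs fuel (i + 1) result
    else result

def find_substring_count (s : String) : Int := outerA s.toList s.toList.length 0 0

-- ===== PORT B =====
def pairMatch (p : Char × Char) : Bool := ((p.1.toNat : Int) + 1 == (p.2.toNat : Int))

-- the comprehension: list of booleans, one per adjacent character pair
def bsOf (cs : List Char) : List Bool := (cs.zip cs.tail).map pairMatch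

-- sum(bs)
def sumB : List Bool → Int
  | [] => 0
  | b :: t => (if b then 1 else 0) + sumB t

-- sum(1 for x, y in zip(bs, bs[1:]) if x and y)
def sumAdj : List (Bool × Bool) → Int
  | [] => 0
  | p :: t => (if p.1 && p.2 then 1 else 0) + sumAdj t

def find_substring_count_alt (s : String) : Int :=
  let bs := bsOf s.toList
  sumB bs - sumAdj (bs.zip bs.tail)

-- ===== PRECONDITION & SPEC =====
def Spec_find_substring_count (s : String) (out : Int) : Prop := out = find_substring_count_alt s
instance (s : String) (out : Int) : Decidable (Spec_find_substring_count s out) := by unfold Spec_find_substring_count; infer_instance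

-- ===== CLAIM (what is proved, stated in full; the proofs are below) =====
def Claim_equal_find_substring_count : Prop := ∀ (s : String), Dom_find_substring_count s → Spec_find_substring_count s (find_substring_count s)

-- ===== LEMMAS AND PROOFS =====

-- reference count of run starts over the list of pair-match booleans
def cnt : List Bool → Bool → Int
  | [], _ => 0
  | b :: t, prev => (if b && !prev then 1 else 0) + cnt t b

theorem bs_length (cs : List Char) : (bsOf cs).length = cs.length - 1 := by
  simp [bsOf]

theorem bs_drop (cs : List Char) (i : Nat) (h : i < cs.length - 1) :
    (bsOf cs).drop i = pvMatch cs i :: (bsOf cs).drop (i + 1) := by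
  have hl : i < (bsOf cs).length := by rw [bs_length]; omega
  rw [List.drop_eq_getElem_cons hl]
  congr 1
  have h1 : i < cs.length := by omega
  have h2 : i + 1 < cs.length := by omega
  simp only [bsOf, List.getElem_map, List.getElem_zip, List.getElem_tail]
  simp [pairMatch, pvMatch, pvOrd, List.getD_eq_getElem?_getD,
    List.getElem?_eq_getElem h1, List.getElem?_eq_getElem h2]

theorem bs_drop_nil (cs : List Char) (i : Nat) (h : ¬ i < cs.length - 1) :
    (bsOf cs).drop i = [] := by
  apply List.drop_eq_nil_of_le
  rw [bs_length]; omega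

theorem pvMatch_false (cs : List Char) (i : Nat)
    (h : ¬ (i < cs.length - 1 ∧ pvMatch cs i = true)) (hi : i < cs.length - 1) :
    pvMatch cs i = false := by
  cases hm : pvMatch cs i with
  | false => rfl
  | true => exact absurd ⟨hi, hm⟩ h

-- enough fuel: innerA does not depend on the fuel
theorem inner_irrel (cs : List Char) (f₁ : Nat) : ∀ (f₂ i : Nat),
    cs.length - 1 - i ≤ f₁ → cs.length - 1 - i ≤ f₂ →
    innerA cs f₁ i = innerA cs f₂ i := by
  induction f₁ with
  | zero =>
    intro f₂ i h₁ h₂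
    have hi : ¬ i < cs.length - 1 := by omega
    cases f₂ with
    | zero => rfl
    | succ f => simp [innerA, hi]
  | succ f ih =>
    intro f₂ i h₁ h₂
    by_cases hc : i < cs.length - 1 ∧ pvMatch cs i = true
    · cases f₂ with
      | zero => omega
      | succ f' =>
        simp only [innerA, if_pos hc]
        exact ih f' (i + 1) (by omega) (by omega)
    · cases f₂ with
      | zero =>
        have hi : ¬ i < cs.length - 1 := by omega
        simp [innerA, hi]
      | succ f' => simp [innerA, hc]

theorem innerA_ge (cs : List Char) (fuel : Nat) : ∀ (i : Nat), i ≤ innerA cs fuel i := by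
  induction fuel with
  | zero => intro i; simp [innerA]
  | succ f ih =>
    intro i
    by_cases hc : i < cs.length - 1 ∧ pvMatch cs i = true
    · simp only [innerA, if_pos hc]
      have := ih (i + 1); omega
    · simp [innerA, hc]

theorem inner_step (cs : List Char) (fuel i : Nat) (hf : cs.length - 1 - i ≤ fuel)
    (hc : i < cs.length - 1 ∧ pvMatch cs i = true) :
    innerA cs fuel i = innerA cs fuel (i + 1) := by
  cases fuel with
  | zero => omega
  | succ f =>
    simp only [innerA, if_pos hc]
    exact inner_irrel cs f (f + 1) (i + 1) (by omega) (by omega)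

theorem inner_cnt (cs : List Char) (fuel : Nat) : ∀ (i : Nat), cs.length - 1 - i ≤ fuel →
    cnt ((bsOf cs).drop i) true = cnt ((bsOf cs).drop (innerA cs fuel i + 1)) false := by
  induction fuel with
  | zero =>
    intro i hf
    have hi : ¬ i < cs.length - 1 := by omega
    rw [innerA, bs_drop_nil cs i hi, bs_drop_nil cs (i + 1) (by omega)]
    simp [cnt]
  | succ f ih =>
    intro i hf
    by_cases hc : i < cs.length - 1 ∧ pvMatch cs i = true
    · simp only [innerA, if_pos hc]
      rw [bs_drop cs i hc.1, hc.2]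
      simpa [cnt] using ih (i + 1) (by omega)
    · simp only [innerA, if_neg hc]
      by_cases hi : i < cs.length - 1
      · rw [bs_drop cs i hi, pvMatch_false cs i hc hi]
        simp [cnt]
      · rw [bs_drop_nil cs i hi, bs_drop_nil cs (i + 1) (by omega)]
        simp [cnt]

theorem outer_cnt (cs : List Char) (fuel : Nat) : ∀ (i : Nat) (r : Int),
    cs.length - 1 - i ≤ fuel →
    outerA cs fuel i r = r + cnt ((bsOf cs).drop i) false := by
  induction fuel with
  | zero =>
    intro i r hf
    rw [outerA, bs_drop_nil cs i (by omega)]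
    simp [cnt]
  | succ f ih =>
    intro i r hf
    by_cases hi : i < cs.length - 1
    · by_cases hm : pvMatch cs i = true
      · simp only [outerA, if_pos hi, if_pos hm]
        have hge : i ≤ innerA cs cs.length i := innerA_ge cs cs.length i
        have hstep : innerA cs cs.length i = innerA cs cs.length (i + 1) :=
          inner_step cs cs.length i (by omega) ⟨hi, hm⟩
        rw [ih (innerA cs cs.length i + 1) (r + 1) (by omega),
          bs_drop cs i hi, hm]
        simp [cnt]
        rw [hstep, ← inner_cnt cs cs.length (i + 1) (by omega)]
        ring
      · simp only [outerA, if_pos hi, if_neg hm]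
        have hm' : pvMatch cs i = false := by simpa using hm
        rw [ih (i + 1) r (by omega), bs_drop cs i hi, hm']
        simp [cnt]
    · simp only [outerA, if_neg hi]
      rw [bs_drop_nil cs i hi]
      simp [cnt]

-- inclusion-exclusion: run-start count = matches minus adjacent match pairs
theorem cnt_eq (bs : List Bool) : ∀ (prev : Bool),
    cnt bs prev =
      sumB bs - sumAdj (bs.zip bs.tail) - (if prev && bs.headD false then 1 else 0) := by
  induction bs with
  | nil => intro prev; simp [cnt, sumB, sumAdj]
  | cons b t ih =>
    intro prev
    cases t with
    | nil => cases b <;> cases prev <;> simp [cnt, sumB, sumAdj]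
    | cons c t' =>
      have := ih b
      simp only [cnt, sumB, sumAdj, List.tail_cons, List.zip_cons_cons, List.headD_cons] at *
      rw [this]
      cases b <;> cases c <;> cases prev <;> simp <;> ring

-- ===== VERDICT (by name: the statement is the Claim_ definition above) =====
theorem find_substring_count_spec : Claim_equal_find_substring_count := by
  intro s _
  unfold Spec_find_substring_count find_substring_count find_substring_count_alt
  rw [outer_cnt s.toList s.toList.length 0 0 (by omega), cnt_eq]
  simp
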